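-- pv_equiv track=rewrite | github.com/cassiobarth/geografia_da_cognicao | src/cog/01_process_saeb_historical.py | find_columns_heuristic
-- ===== SOURCE A (Python) =====
-- def find_columns_heuristic(all_cols, grade_tag):
--     upper_cols = [c.upper() for c in all_cols]
--     lp_cands, mt_cands = [], []
--     for original, upper in zip(all_cols, upper_cols):
--         if 'MEDIA' in upper or 'PROFICIENCIA' in upper:
--             if grade_tag in upper or (grade_tag == '3EM' and '_EM_' in upper):
--                 if 'LP' in upper or 'LINGUA' in upper: lp_cands.append(original)
--                 elif 'MT' in upper or 'MAT' in upper: mt_cands.append(original)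
--
--     lp = min(lp_cands, key=len) if lp_cands else None
--     mt = min(mt_cands, key=len) if mt_cands else None
--     return lp, mt
-- ===== SOURCE B (Python) =====
-- def _classify(u, grade_tag):
--     """Classify an upper-cased column name as 'LP', 'MT' or None."""
--     if 'MEDIA' not in u and 'PROFICIENCIA' not in u:
--         return None
--     if grade_tag not in u and not (grade_tag == '3EM' and '_EM_' in u):
--         return None
--     if 'LP' in u or 'LINGUA' in u:
--         return 'LP'
--     if 'MT' in u or 'MAT' in u:
--         return 'MT'
--     return None
--
-- def find_columns_heuristic(all_cols, grade_tag):
--     # Stable-sort all columns by length once, then the FIRST matching column in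
--     # that order is exactly min(candidates, key=len) with its first-occurrence
--     # tie-break (stable sort keeps original order among equal lengths).
--     by_len = sorted(all_cols, key=len)
--     lp = next((c for c in by_len if _classify(c.upper(), grade_tag) == 'LP'), None)
--     mt = next((c for c in by_len if _classify(c.upper(), grade_tag) == 'MT'), None)
--     return lp, mt
-- ===== Notes on version B (the rewrite author's own statement) =====
-- stated objective: alternative
-- what changed: Replaces A's one-pass candidate-list collection plus min(key=len) by a staged pipeline: stable-sort all columns by length once, then take the first LP-classified and the first MT-classified column in that order (stability preserves min's first-occurrence tie-break).
import Mathlib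
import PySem

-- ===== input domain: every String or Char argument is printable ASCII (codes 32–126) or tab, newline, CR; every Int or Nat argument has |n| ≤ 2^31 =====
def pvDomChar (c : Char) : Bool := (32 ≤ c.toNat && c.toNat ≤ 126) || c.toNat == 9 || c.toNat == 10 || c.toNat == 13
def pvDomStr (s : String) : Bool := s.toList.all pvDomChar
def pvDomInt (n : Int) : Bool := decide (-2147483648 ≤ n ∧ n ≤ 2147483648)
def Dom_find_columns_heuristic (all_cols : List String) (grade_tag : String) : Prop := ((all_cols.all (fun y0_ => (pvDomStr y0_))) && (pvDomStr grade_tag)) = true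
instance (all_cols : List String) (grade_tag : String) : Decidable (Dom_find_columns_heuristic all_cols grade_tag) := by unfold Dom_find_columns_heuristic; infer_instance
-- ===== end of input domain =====

-- B replaces A's candidate lists + min(key=len) by stable-sorting all columns by length once and taking the first LP/MT match (alternative decomposition, same result).

-- ===== PORT A =====
-- the loop body of A: appends the original column to lp_cands or mt_cands
def pvStepA (grade_tag : String) (acc : List String × List String) (p : String × String) :
    List String × List String :=
  let original := p.1
  let upper := p.2
  if PySem.Str.isIn "MEDIA" upper || PySem.Str.isIn "PROFICIENCIA" upper then
    if PySem.Str.isIn grade_tag upper || (grade_tag == "3EM" && PySem.Str.isIn "_EM_" upper) then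
      if PySem.Str.isIn "LP" upper || PySem.Str.isIn "LINGUA" upper then
        (acc.1 ++ [original], acc.2)
      else if PySem.Str.isIn "MT" upper || PySem.Str.isIn "MAT" upper then
        (acc.1, acc.2 ++ [original])
      else acc
    else acc
  else acc

def find_columns_heuristic (all_cols : List String) (grade_tag : String) :
    Option String × Option String :=
  let upper_cols := all_cols.map PySem.Str.upper
  let cands := (all_cols.zip upper_cols).foldl (pvStepA grade_tag) ([], [])
  let lp := if cands.1.isEmpty then none else PySem.List.min? cands.1 PySem.Str.len
  let mt := if cands.2.isEmpty then none else PySem.List.min? cands.2 PySem.Str.len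
  (lp, mt)

-- ===== PORT B =====
-- Source B's _classify: upper-cased column name ↦ some "LP" / some "MT" / none
def pvClassify (u : String) (grade_tag : String) : Option String :=
  if !PySem.Str.isIn "MEDIA" u && !PySem.Str.isIn "PROFICIENCIA" u then none
  else if !PySem.Str.isIn grade_tag u && !(grade_tag == "3EM" && PySem.Str.isIn "_EM_" u) then none
  else if PySem.Str.isIn "LP" u || PySem.Str.isIn "LINGUA" u then some "LP"
  else if PySem.Str.isIn "MT" u || PySem.Str.isIn "MAT" u then some "MT"
  else none

def find_columns_heuristic_alt (all_cols : List String) (grade_tag : String) :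
    Option String × Option String :=
  let by_len := PySem.List.sorted all_cols PySem.Str.len
  (by_len.find? (fun c => pvClassify (PySem.Str.upper c) grade_tag == some "LP"),
   by_len.find? (fun c => pvClassify (PySem.Str.upper c) grade_tag == some "MT"))

-- ===== PRECONDITION & SPEC =====
def Spec_find_columns_heuristic (all_cols : List String) (grade_tag : String) (out : Option String × Option String) : Prop := out = find_columns_heuristic_alt all_cols grade_tag
instance (all_cols : List String) (grade_tag : String) (out : Option String × Option String) : Decidable (Spec_find_columns_heuristic all_cols grade_tag out) := by unfold Spec_find_columns_heuristic; infer_instance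

-- ===== CLAIM (what is proved, stated in full; the proofs are below) =====
def Claim_equal_find_columns_heuristic : Prop := ∀ (all_cols : List String) (grade_tag : String), Dom_find_columns_heuristic all_cols grade_tag → Spec_find_columns_heuristic all_cols grade_tag (find_columns_heuristic all_cols grade_tag)

-- ===== LEMMAS AND PROOFS =====

-- classification predicates (proof-only)
def pvQual (grade_tag u : String) : Bool :=
  (PySem.Str.isIn "MEDIA" u || PySem.Str.isIn "PROFICIENCIA" u) &&
  (PySem.Str.isIn grade_tag u || (grade_tag == "3EM" && PySem.Str.isIn "_EM_" u))

def pvIsLP (grade_tag c : String) : Bool :=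
  pvQual grade_tag (PySem.Str.upper c) &&
  (PySem.Str.isIn "LP" (PySem.Str.upper c) || PySem.Str.isIn "LINGUA" (PySem.Str.upper c))

def pvIsMT (grade_tag c : String) : Bool :=
  pvQual grade_tag (PySem.Str.upper c) &&
  !(PySem.Str.isIn "LP" (PySem.Str.upper c) || PySem.Str.isIn "LINGUA" (PySem.Str.upper c)) &&
  (PySem.Str.isIn "MT" (PySem.Str.upper c) || PySem.Str.isIn "MAT" (PySem.Str.upper c))

-- the running-min update performed by min? with key = Str.len
def pvUpd (o : Option String) (c : String) : Option String :=
  match o with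
  | none => some c
  | some m => if PySem.Str.len c < PySem.Str.len m then some c else some m

-- B's classification tests re-expressed via the predicates
theorem pvClassify_LP (grade_tag c : String) :
    (pvClassify (PySem.Str.upper c) grade_tag == some "LP") = pvIsLP grade_tag c := by
  simp only [pvClassify, pvIsLP, pvQual]
  rcases Bool.eq_false_or_eq_true (PySem.Str.isIn "MEDIA" (PySem.Str.upper c)) with h1 | h1 <;>
    rcases Bool.eq_false_or_eq_true (PySem.Str.isIn "PROFICIENCIA" (PySem.Str.upper c)) with h2 | h2 <;>
    rcases Bool.eq_false_or_eq_true (PySem.Str.isIn grade_tag (PySem.Str.upper c)) with h3 | h3 <;>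
    rcases Bool.eq_false_or_eq_true (grade_tag == "3EM" && PySem.Str.isIn "_EM_" (PySem.Str.upper c)) with h4 | h4 <;>
    rcases Bool.eq_false_or_eq_true (PySem.Str.isIn "LP" (PySem.Str.upper c) || PySem.Str.isIn "LINGUA" (PySem.Str.upper c)) with h5 | h5 <;>
    rcases Bool.eq_false_or_eq_true (PySem.Str.isIn "MT" (PySem.Str.upper c) || PySem.Str.isIn "MAT" (PySem.Str.upper c)) with h6 | h6 <;>
    simp only [h1, h2, h3, h4, h5, h6] <;> simp

theorem pvClassify_MT (grade_tag c : String) :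
    (pvClassify (PySem.Str.upper c) grade_tag == some "MT") = pvIsMT grade_tag c := by
  simp only [pvClassify, pvIsMT, pvQual]
  rcases Bool.eq_false_or_eq_true (PySem.Str.isIn "MEDIA" (PySem.Str.upper c)) with h1 | h1 <;>
    rcases Bool.eq_false_or_eq_true (PySem.Str.isIn "PROFICIENCIA" (PySem.Str.upper c)) with h2 | h2 <;>
    rcases Bool.eq_false_or_eq_true (PySem.Str.isIn grade_tag (PySem.Str.upper c)) with h3 | h3 <;>
    rcases Bool.eq_false_or_eq_true (grade_tag == "3EM" && PySem.Str.isIn "_EM_" (PySem.Str.upper c)) with h4 | h4 <;>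
    rcases Bool.eq_false_or_eq_true (PySem.Str.isIn "LP" (PySem.Str.upper c) || PySem.Str.isIn "LINGUA" (PySem.Str.upper c)) with h5 | h5 <;>
    rcases Bool.eq_false_or_eq_true (PySem.Str.isIn "MT" (PySem.Str.upper c) || PySem.Str.isIn "MAT" (PySem.Str.upper c)) with h6 | h6 <;>
    simp only [h1, h2, h3, h4, h5, h6] <;> simp

-- one step of A, characterized via the classification predicates
theorem pvStepA_eq (grade_tag c : String) (a b : List String) :
    pvStepA grade_tag (a, b) (c, PySem.Str.upper c) =
      if pvIsLP grade_tag c then (a ++ [c], b)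
      else if pvIsMT grade_tag c then (a, b ++ [c])
      else (a, b) := by
  simp only [pvStepA, pvIsLP, pvIsMT, pvQual]
  rcases Bool.eq_false_or_eq_true (PySem.Str.isIn "MEDIA" (PySem.Str.upper c) ||
      PySem.Str.isIn "PROFICIENCIA" (PySem.Str.upper c)) with hm | hm <;>
    rcases Bool.eq_false_or_eq_true (PySem.Str.isIn grade_tag (PySem.Str.upper c) ||
      (grade_tag == "3EM" && PySem.Str.isIn "_EM_" (PySem.Str.upper c))) with hg | hg <;>
    rcases Bool.eq_false_or_eq_true (PySem.Str.isIn "LP" (PySem.Str.upper c) ||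
      PySem.Str.isIn "LINGUA" (PySem.Str.upper c)) with hl | hl <;>
    rcases Bool.eq_false_or_eq_true (PySem.Str.isIn "MT" (PySem.Str.upper c) ||
      PySem.Str.isIn "MAT" (PySem.Str.upper c)) with ht | ht <;>
    simp only [hm, hg, hl, ht] <;> simp

-- A's fold builds exactly the two filtered candidate lists
theorem pvFoldA_filter (grade_tag : String) :
    ∀ (xs : List String) (a b : List String),
      (xs.map (fun c => (c, PySem.Str.upper c))).foldl (pvStepA grade_tag) (a, b) =
        (a ++ xs.filter (pvIsLP grade_tag), b ++ xs.filter (pvIsMT grade_tag)) := by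
  intro xs
  induction xs with
  | nil => intro a b; simp
  | cons c t ih =>
    intro a b
    simp only [List.map_cons, List.foldl_cons, pvStepA_eq]
    by_cases hL : pvIsLP grade_tag c = true
    · have hM : pvIsMT grade_tag c = false := by
        simp only [pvIsLP, Bool.and_eq_true] at hL
        simp only [pvIsMT, hL.2, Bool.not_true, Bool.and_false, Bool.false_and]
      rw [if_pos hL, ih]
      simp [hL, hM]
    · rw [if_neg hL]
      by_cases hM : pvIsMT grade_tag c = true
      · rw [if_pos hM, ih]
        simp [hL, hM]
      · rw [if_neg hM, ih]
        simp [hL, hM]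

-- min? with the isEmpty guard is min? plain (min? [] = none)
theorem pvMinGuard (xs : List String) :
    (if xs.isEmpty then none else PySem.List.min? xs PySem.Str.len) =
      PySem.List.min? xs PySem.Str.len := by
  cases xs <;> simp [PySem.List.min?]

-- min? IS the running-min fold pvUpd
theorem pvMin_eq_fold (xs : List String) :
    PySem.List.min? xs PySem.Str.len = xs.foldl pvUpd none := by
  simp only [PySem.List.min?]
  apply List.foldl_ext
  intro o c _
  cases o <;> rfl

-- zip with the mapped upper-case list is a map of pairs
theorem pvZipMap (xs : List String) :
    xs.zip (xs.map PySem.Str.upper) = xs.map (fun c => (c, PySem.Str.upper c)) := by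
  induction xs with
  | nil => rfl
  | cons c t ih => simpa [List.zip] using ih

-- inserting into a (y :: t) list: insertBy unfolded one step
theorem pvInsertBy_cons (x y : String) (t : List String) :
    PySem.List.insertBy (fun a b => decide (PySem.Str.len a < PySem.Str.len b)) x (y :: t) =
      if PySem.Str.len x < PySem.Str.len y then x :: y :: t
      else y :: PySem.List.insertBy (fun a b => decide (PySem.Str.len a < PySem.Str.len b)) x t := by
  simp only [PySem.List.insertBy]
  split <;> simp_all

-- inserting x into a length-sorted list: the first p-match becomes the running-min update
theorem pvFind_insertBy (p : String → Bool) (x : String) :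
    ∀ (s : List String),
      s.Pairwise (fun a b => PySem.Str.len a ≤ PySem.Str.len b) →
      (PySem.List.insertBy (fun a b => decide (PySem.Str.len a < PySem.Str.len b)) x s).find? p =
        if p x then pvUpd (s.find? p) x else s.find? p := by
  intro s
  induction s with
  | nil =>
    intro _
    by_cases hx : p x = true <;> simp [PySem.List.insertBy, List.find?, hx, pvUpd]
  | cons y t ih =>
    intro hs
    rcases List.pairwise_cons.mp hs with ⟨hy, ht⟩
    rw [pvInsertBy_cons]
    by_cases hlt : PySem.Str.len x < PySem.Str.len y
    · -- x goes in front
      rw [if_pos hlt]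
      by_cases hx : p x = true
      · rw [if_pos hx, List.find?_cons_of_pos hx]
        cases hfind : (y :: t).find? p with
        | none => rfl
        | some m =>
          have hm : m ∈ y :: t := List.mem_of_find?_eq_some hfind
          have hym : PySem.Str.len y ≤ PySem.Str.len m := by
            rcases List.mem_cons.mp hm with h | h
            · exact h ▸ le_refl _
            · exact hy m h
          have hxm : PySem.Str.len x < PySem.Str.len m := lt_of_lt_of_le hlt hym
          simp only [pvUpd]
          rw [if_pos hxm]
      · have hx' : p x = false := by simpa using hx
        rw [if_neg (by simp [hx']), List.find?_cons_of_neg (by simp [hx'])]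
    · -- x goes after y
      rw [if_neg hlt]
      by_cases hpy : p y = true
      · rw [List.find?_cons_of_pos hpy, List.find?_cons_of_pos hpy]
        by_cases hx : p x = true
        · rw [if_pos hx]
          simp only [pvUpd]
          rw [if_neg hlt]
        · rw [if_neg (by simpa using hx)]
      · have hpy' : p y = false := by simpa using hpy
        rw [List.find?_cons_of_neg (by simp [hpy']), List.find?_cons_of_neg (by simp [hpy']),
            ih ht]

-- the first p-match of the length-sorted list IS the running min over the p-filtered list
theorem pvFind_sorted (p : String → Bool) (xs : List String) :
    (PySem.List.sorted xs PySem.Str.len).find? p = (xs.filter p).foldl pvUpd none := by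
  induction xs using List.reverseRecOn with
  | nil => simp [PySem.List.sorted_eq_foldl_insertBy]
  | append_singleton xs x ih =>
    have hsort : PySem.List.sorted (xs ++ [x]) PySem.Str.len =
        PySem.List.insertBy (fun a b => decide (PySem.Str.len a < PySem.Str.len b)) x
          (PySem.List.sorted xs PySem.Str.len) := by
      rw [PySem.List.sorted_eq_foldl_insertBy, PySem.List.sorted_eq_foldl_insertBy,
          List.foldl_append]
      rfl
    rw [hsort, pvFind_insertBy p x _ (PySem.List.sorted_pairwise xs PySem.Str.len), ih,
        List.filter_append]
    by_cases hx : p x = true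
    · simp [hx, List.foldl_append]
    · have hx' : p x = false := by simpa using hx
      simp [hx']

-- ===== VERDICT (by name: the statement is the Claim_ definition above) =====
theorem find_columns_heuristic_spec : Claim_equal_find_columns_heuristic := by
  intro all_cols grade_tag _
  show find_columns_heuristic all_cols grade_tag = find_columns_heuristic_alt all_cols grade_tag
  simp only [find_columns_heuristic, find_columns_heuristic_alt]
  have hLP : (fun c => pvClassify (PySem.Str.upper c) grade_tag == some "LP") = pvIsLP grade_tag :=
    funext (pvClassify_LP grade_tag)
  have hMT : (fun c => pvClassify (PySem.Str.upper c) grade_tag == some "MT") = pvIsMT grade_tag :=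
    funext (pvClassify_MT grade_tag)
  rw [hLP, hMT, pvZipMap, pvFoldA_filter grade_tag all_cols [] []]
  simp only [List.nil_append]
  rw [pvMinGuard, pvMinGuard, pvMin_eq_fold, pvMin_eq_fold,
      pvFind_sorted (pvIsLP grade_tag), pvFind_sorted (pvIsMT grade_tag)]
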